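-- pv_equiv track=rewrite | github.com/phantatbach/SynFlow_Demonstration | SynFlow/SCD/slot_df.py | split_periods
-- ===== SOURCE A (Python) =====
-- from math import inf
-- from typing import Iterable, List, Tuple, Dict
--
-- def split_periods(periods: Iterable, starting_points: Iterable[int]) -> Tuple[List[List[int]], List[Tuple[int,int]]]:
--     """
--     Split the given periods into smaller blocks based on the provided starting points.
--
--     Parameters:
--         periods (Iterable): A list of period values.
--         starting_points (Iterable[int]): A list of starting cutoff points.
--
--     Returns:
--         Tuple[List[List[int]], List[Tuple[int,int]]]: A tuple containing two lists.
--             The first list contains the blocks of period values.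
--             The second list contains tuples of (low_bound, high_bound) for each block.
--     """
--     period_list = []
--     for period in periods:
--         try:
--             period_list.append(int(period))
--         except (TypeError, ValueError):
--             continue
--     period_set = sorted(set(period_list))
--
--     blocks = []
--
--     if starting_points:
--         # Get a set of starting cutoff points
--         cuts = sorted({int(starting_point) for starting_point in starting_points})
--         for i, low_bound in enumerate(cuts):
--             high_bound = cuts[i+1] if i+1 < len(cuts) else inf
--             block = [period for period in period_set if low_bound <= period < high_bound]
--             if block:
--                 blocks.append(block)
--     else:
--         blocks = [period_set]
--
--     return blocks
-- ===== SOURCE B (Python) =====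
-- def split_periods(periods, starting_points):
--     period_list = []
--     for period in periods:
--         try:
--             period_list.append(int(period))
--         except (TypeError, ValueError):
--             continue
--     ps = sorted(set(period_list))
--     if starting_points:
--         cuts = sorted({int(s) for s in starting_points})
--         blocks = []
--         i = 0
--         n = len(ps)
--         # skip periods below the first cut
--         while i < n and ps[i] < cuts[0]:
--             i += 1
--         # one forward sweep: each interval [cuts[j], cuts[j+1]) is a contiguous slice
--         for j in range(len(cuts) - 1):
--             hi = cuts[j + 1]
--             start = i
--             while i < n and ps[i] < hi:
--                 i += 1
--             if i > start:
--                 blocks.append(ps[start:i])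
--         # last interval [cuts[-1], inf)
--         if i < n:
--             blocks.append(ps[i:])
--         return blocks
--     else:
--         return [ps]
-- ===== Notes on version B (the rewrite author's own statement) =====
-- stated objective: faster
-- what changed: Instead of filtering the whole sorted period set once per cut (O(C*N) after sorting), B makes a single forward sweep over the sorted deduplicated periods with one pointer, slicing out each interval [cuts[j], cuts[j+1]) contiguously.
import Mathlib
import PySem

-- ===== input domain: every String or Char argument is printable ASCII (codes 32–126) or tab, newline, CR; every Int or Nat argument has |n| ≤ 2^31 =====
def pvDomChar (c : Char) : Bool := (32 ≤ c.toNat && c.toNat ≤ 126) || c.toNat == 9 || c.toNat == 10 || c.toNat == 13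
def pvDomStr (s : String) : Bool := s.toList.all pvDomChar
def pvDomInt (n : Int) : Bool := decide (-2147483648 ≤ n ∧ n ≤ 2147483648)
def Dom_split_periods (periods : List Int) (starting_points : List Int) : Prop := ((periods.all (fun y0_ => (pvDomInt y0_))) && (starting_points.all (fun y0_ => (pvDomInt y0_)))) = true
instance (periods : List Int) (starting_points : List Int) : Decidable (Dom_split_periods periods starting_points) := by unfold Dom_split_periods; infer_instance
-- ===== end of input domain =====

-- B replaces A's per-cut filter over the whole sorted period set by a single
-- forward sweep that slices each interval out of the sorted list.

-- ===== PORT A =====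
-- A: period_list = [int(p) for p in periods] (int() on an int never raises);
--    period_set = sorted(set(period_list)); per cut i: high = cuts[i+1] or inf
--    (inf modelled as `none`: `p < inf` is always true), append block if nonempty.
def split_periods (periods : List Int) (starting_points : List Int) : List (List Int) :=
  let period_list : List Int := periods
  let period_set : List Int := PySem.List.sorted (PySem.Set.ofList period_list) (fun x => x)
  if starting_points ≠ [] then
    let cuts : List Int := PySem.List.sorted (PySem.Set.ofList starting_points) (fun x => x)
    (PySem.List.enumerate cuts).foldl (fun blocks il =>
      let low_bound := il.2
      let high? : Option Int :=
        if il.1 + 1 < (cuts.length : Int) then PySem.List.pyGet? cuts (il.1 + 1) else none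
      let block := period_set.filter (fun p =>
        decide (low_bound ≤ p) && (match high? with | none => true | some h => decide (p < h)))
      if block ≠ [] then blocks ++ [block] else blocks) []
  else
    [period_set]

-- ===== PORT B =====
-- the forward sweep of Source B: the remaining (sorted) periods are consumed left to
-- right; takeWhile/dropWhile is the pointer advancing `while i < n and ps[i] < hi`
def splitSweep (rest : List Int) (cuts : List Int) : List (List Int) :=
  match cuts with
  | [] => []
  | [_] => if rest = [] then [] else [rest]
  | _ :: next :: tl =>
      let block := rest.takeWhile (fun x => decide (x < next))
      let rest' := rest.dropWhile (fun x => decide (x < next))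
      (if block = [] then [] else [block]) ++ splitSweep rest' (next :: tl)

def split_periods_alt (periods : List Int) (starting_points : List Int) : List (List Int) :=
  let ps : List Int := PySem.List.sorted (PySem.Set.ofList periods) (fun x => x)
  if starting_points ≠ [] then
    let cuts : List Int := PySem.List.sorted (PySem.Set.ofList starting_points) (fun x => x)
    -- cuts[0]: cuts is nonempty here, so the default of headD is never used
    splitSweep (ps.dropWhile (fun x => decide (x < cuts.headD 0))) cuts
  else
    [ps]

-- ===== PRECONDITION & SPEC =====
def Spec_split_periods (periods : List Int) (starting_points : List Int) (out : List (List Int)) : Prop := out = split_periods_alt periods starting_points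
instance (periods : List Int) (starting_points : List Int) (out : List (List Int)) : Decidable (Spec_split_periods periods starting_points out) := by unfold Spec_split_periods; infer_instance

-- ===== CLAIM (what is proved, stated in full; the proofs are below) =====
def Claim_equal_split_periods : Prop := ∀ (periods : List Int) (starting_points : List Int), Dom_split_periods periods starting_points → Spec_split_periods periods starting_points (split_periods periods starting_points)

-- ===== LEMMAS AND PROOFS =====

-- A's filter predicate for one interval [low, high?) (high? = none is +inf)
def blockPred (low : Int) (high? : Option Int) (p : Int) : Bool :=
  decide (low ≤ p) && (match high? with | none => true | some h => decide (p < h))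

-- the block A builds for the enumerate entry il over cuts
def aBlock (cuts : List Int) (il : Int × Int) (ps : List Int) : List Int :=
  ps.filter (blockPred il.2
    (if il.1 + 1 < (cuts.length : Int) then PySem.List.pyGet? cuts (il.1 + 1) else none))

-- structural form of the per-cut blocks A builds (before dropping the empties)
def blocksAll (ps : List Int) : List Int → List (List Int)
  | [] => []
  | c :: rest => ps.filter (blockPred c rest.head?) :: blocksAll ps rest

-- the `high?` A computes at position s is just the next element of cuts
lemma high_eq_head_drop (full : List Int) (s : Nat) :
    (if (s : Int) + 1 < (full.length : Int) then PySem.List.pyGet? full ((s : Int) + 1) else none)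
      = (full.drop (s + 1)).head? := by
  rw [List.head?_drop]
  have hcast : ((s : Int) + 1) = ((s + 1 : Nat) : Int) := by push_cast; ring
  by_cases h : s + 1 < full.length
  · rw [if_pos (by exact_mod_cast h), hcast, PySem.List.pyGet?_natCast]
  · rw [if_neg (by exact_mod_cast h)]
    exact (List.getElem?_eq_none_iff.mpr (by omega)).symm

-- A's map over enumerate equals the structural blocksAll
lemma map_enum_eq_blocksAll (ps full : List Int) :
    ∀ (rest : List Int) (s : Nat), full.drop s = rest →
      (PySem.List.enumerate rest (s : Int)).map (fun il => aBlock full il ps)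
        = blocksAll ps rest := by
  intro rest
  induction rest with
  | nil => intro s _; simp [PySem.List.enumerate, blocksAll]
  | cons c rest ih =>
    intro s hdrop
    have hdrop' : full.drop (s + 1) = rest := by
      have := congrArg List.tail hdrop
      simpa [List.tail_drop] using this
    have hhead := high_eq_head_drop full s
    rw [hdrop'] at hhead
    rw [PySem.List.enumerate_cons, List.map_cons,
        show blocksAll ps (c :: rest) = ps.filter (blockPred c rest.head?) :: blocksAll ps rest
          from rfl]
    congr 1
    · simp only [aBlock, hhead]
    · have hcast : ((s : Int) + 1) = ((s + 1 : Nat) : Int) := by push_cast; ring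
      rw [hcast, ih (s + 1) hdrop']

-- A's fold (its body written out) builds blocksAll with the empty blocks dropped
lemma foldA_eq (ps cuts : List Int) :
    (PySem.List.enumerate cuts).foldl (fun blocks il =>
        if ps.filter (fun p => decide (il.2 ≤ p) &&
              (match (if il.1 + 1 < (cuts.length : Int) then PySem.List.pyGet? cuts (il.1 + 1) else none) with
                | none => true | some h => decide (p < h))) ≠ [] then
          blocks ++ [ps.filter (fun p => decide (il.2 ≤ p) &&
              (match (if il.1 + 1 < (cuts.length : Int) then PySem.List.pyGet? cuts (il.1 + 1) else none) with
                | none => true | some h => decide (p < h)))]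
        else blocks) []
      = (blocksAll ps cuts).filter (fun b => decide (b ≠ [])) := by
  have hstep : (fun (blocks : List (List Int)) (il : Int × Int) =>
        if ps.filter (fun p => decide (il.2 ≤ p) &&
              (match (if il.1 + 1 < (cuts.length : Int) then PySem.List.pyGet? cuts (il.1 + 1) else none) with
                | none => true | some h => decide (p < h))) ≠ [] then
          blocks ++ [ps.filter (fun p => decide (il.2 ≤ p) &&
              (match (if il.1 + 1 < (cuts.length : Int) then PySem.List.pyGet? cuts (il.1 + 1) else none) with
                | none => true | some h => decide (p < h)))]
        else blocks)
      = (fun acc il => if (fun jl => decide (aBlock cuts jl ps ≠ [])) il = true then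
          acc ++ [(fun jl => aBlock cuts jl ps) il] else acc) := by
    funext acc il
    have hfb : (ps.filter (fun p => decide (il.2 ≤ p) &&
        (match (if il.1 + 1 < (cuts.length : Int) then PySem.List.pyGet? cuts (il.1 + 1) else none) with
          | none => true | some h => decide (p < h)))) = aBlock cuts il ps := rfl
    rw [hfb]
    by_cases hb : aBlock cuts il ps = []
    · rw [if_neg (not_not_intro hb), if_neg (by simp [hb])]
    · rw [if_pos hb, if_pos (by simp [hb])]
  rw [hstep, PySem.List.foldl_append_if, List.nil_append,
      show (fun jl => decide (aBlock cuts jl ps ≠ []))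
          = ((fun b => decide (b ≠ [])) ∘ (fun jl => aBlock cuts jl ps)) from rfl,
      ← List.filter_map]
  have hm := map_enum_eq_blocksAll ps cuts cuts 0 List.drop_zero
  rw [Nat.cast_zero] at hm
  rw [hm]

-- sorted lists: dropWhile (< c) is filter (c ≤ ·)
lemma dropWhile_lt_sorted (c : Int) :
    ∀ (l : List Int), l.Pairwise (· ≤ ·) →
      l.dropWhile (fun x => decide (x < c)) = l.filter (fun x => decide (c ≤ x)) := by
  intro l
  induction l with
  | nil => intro _; rfl
  | cons a t ih =>
    intro h
    rcases List.pairwise_cons.mp h with ⟨ha, ht⟩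
    by_cases hac : a < c
    · simp [hac, not_le.mpr hac, ih ht]
    · have hca : c ≤ a := not_lt.mp hac
      have hall : ∀ x ∈ t, decide (c ≤ x) = true := fun x hx => by
        simp [le_trans hca (ha x hx)]
      simp [hac, hca, List.filter_eq_self.mpr hall]

-- sorted lists: takeWhile (< c) is filter (· < c)
lemma takeWhile_lt_sorted (c : Int) :
    ∀ (l : List Int), l.Pairwise (· ≤ ·) →
      l.takeWhile (fun x => decide (x < c)) = l.filter (fun x => decide (x < c)) := by
  intro l
  induction l with
  | nil => intro _; rfl
  | cons a t ih =>
    intro h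
    rcases List.pairwise_cons.mp h with ⟨ha, ht⟩
    by_cases hac : a < c
    · simp [hac, ih ht]
    · have hall : ∀ x ∈ t, ¬ (decide (x < c) = true) := fun x hx => by
        simp [not_lt.mpr (le_trans (not_lt.mp hac) (ha x hx))]
      simp [hac, List.filter_eq_nil_iff.mpr hall]

-- the bridge: dropping empty blocks from A's per-cut filters is B's single sweep
lemma blocksAll_filter_eq_sweep (ps : List Int) (hps : ps.Pairwise (· ≤ ·)) :
    ∀ (cs : List Int) (c : Int), (c :: cs).Pairwise (· ≤ ·) →
      (blocksAll ps (c :: cs)).filter (fun b => decide (b ≠ []))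
        = splitSweep (ps.dropWhile (fun x => decide (x < c))) (c :: cs) := by
  intro cs
  induction cs with
  | nil =>
    intro c _
    rw [dropWhile_lt_sorted c ps hps,
        show blocksAll ps [c] = [ps.filter (blockPred c none)] from rfl,
        show blockPred c none = fun x => decide (c ≤ x) from by funext x; simp [blockPred]]
    simp only [splitSweep, List.filter_cons, List.filter_nil]
    by_cases hb : ps.filter (fun x => decide (c ≤ x)) = [] <;> simp [hb]
  | cons c' tl ih =>
    intro c hsort
    rcases List.pairwise_cons.mp hsort with ⟨hc, hsort'⟩
    have hcc' : c ≤ c' := hc c' (by simp)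
    have hfs : (ps.filter (fun x => decide (c ≤ x))).Pairwise (· ≤ ·) := hps.filter _
    have hblock : (ps.dropWhile (fun x => decide (x < c))).takeWhile (fun x => decide (x < c'))
        = ps.filter (blockPred c (some c')) := by
      rw [dropWhile_lt_sorted c ps hps, takeWhile_lt_sorted c' _ hfs, List.filter_filter]
      apply List.filter_congr
      intro x _
      simp [blockPred, Bool.and_comm]
    have hrest : (ps.dropWhile (fun x => decide (x < c))).dropWhile (fun x => decide (x < c'))
        = ps.dropWhile (fun x => decide (x < c')) := by
      rw [dropWhile_lt_sorted c ps hps, dropWhile_lt_sorted c' _ hfs,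
          dropWhile_lt_sorted c' ps hps, List.filter_filter]
      apply List.filter_congr
      intro x _
      by_cases hx : c' ≤ x
      · simp [hx, le_trans hcc' hx]
      · simp [hx]
    have hR : splitSweep (ps.dropWhile (fun x => decide (x < c))) (c :: c' :: tl)
        = (if ps.filter (blockPred c (some c')) = [] then []
            else [ps.filter (blockPred c (some c'))])
          ++ splitSweep (ps.dropWhile (fun x => decide (x < c'))) (c' :: tl) := by
      simp only [splitSweep]
      rw [hblock, hrest]
    rw [show blocksAll ps (c :: c' :: tl)
          = ps.filter (blockPred c (some c')) :: blocksAll ps (c' :: tl) from rfl,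
        hR, List.filter_cons, ← ih c' hsort']
    by_cases hb : ps.filter (blockPred c (some c')) = [] <;> simp [hb]

theorem split_periods_spec : Claim_equal_split_periods := by
  intro periods starting_points _
  unfold Spec_split_periods
  simp only [split_periods, split_periods_alt]
  by_cases h : starting_points ≠ []
  · rw [if_pos h, if_pos h]
    have hne : PySem.List.sorted (PySem.Set.ofList starting_points) (fun x => x) ≠ [] := by
      intro hnil
      have hperm : (PySem.List.sorted (PySem.Set.ofList starting_points) (fun x => x)).Perm
          (PySem.Set.ofList starting_points) := PySem.List.sorted_perm ..
      rw [hnil] at hperm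
      have h0 : PySem.Set.ofList starting_points = [] := hperm.symm.eq_nil
      obtain ⟨a, ha⟩ := List.exists_mem_of_ne_nil _ h
      have hmem : a ∈ PySem.Set.ofList starting_points := (PySem.Set.mem_ofList _ _).mpr ha
      rw [h0] at hmem
      exact absurd hmem (List.not_mem_nil)
    obtain ⟨c, cs, hc⟩ := List.exists_cons_of_ne_nil hne
    have hps : (PySem.List.sorted (PySem.Set.ofList periods) (fun x => x)).Pairwise (· ≤ ·) :=
      (PySem.List.sorted_ofList_pairwise_lt periods).imp le_of_lt
    have hcuts : (c :: cs).Pairwise ((· ≤ ·) : Int → Int → Prop) := by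
      rw [← hc]
      exact (PySem.List.sorted_ofList_pairwise_lt starting_points).imp le_of_lt
    rw [hc, foldA_eq, List.headD_cons]
    exact blocksAll_filter_eq_sweep _ hps cs c hcuts
  · rw [if_neg h, if_neg h]
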